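-- pv_equiv track=rewrite | github.com/mpaolodr/p_problems | gca-prac/attempt1.py | mutateTheArray
-- ===== SOURCE A (Python) =====
-- def mutateTheArray(n, a):
--
--     new_arr = [0] * len(a)
--
--     for i in range(len(new_arr)):
--
--         cur_elem = a[i]
--
--         if i == 0:
--
--             first_elem = 0
--
--         else:
--
--             first_elem = a[i - 1]
--
--         if i == len(new_arr) - 1:
--
--             last_elem = 0
--
--         else:
--
--             last_elem = a[i + 1]
--
--         new_arr[i] = first_elem + cur_elem + last_elem
--
--     return new_arr
-- ===== SOURCE B (Python) =====
-- def mutateTheArray(n, a):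
--     # Prefix-sum algorithm: build cumulative sums once, then each answer is a
--     # difference of two prefix sums over the clamped window [i-1, i+2).
--     prefix = [0]
--     for x in a:
--         prefix.append(prefix[-1] + x)
--     ln = len(a)
--     return [prefix[min(i + 2, ln)] - prefix[max(i - 1, 0)] for i in range(ln)]
-- ===== Notes on version B (the rewrite author's own statement) =====
-- stated objective: alternative
-- what changed: Replaces the per-index neighbour lookups with boundary branches by a two-stage prefix-sum algorithm: build a cumulative-sum array once, then each output is the difference of two prefix sums over the clamped window [i-1, i+2).
import Mathlib
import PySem

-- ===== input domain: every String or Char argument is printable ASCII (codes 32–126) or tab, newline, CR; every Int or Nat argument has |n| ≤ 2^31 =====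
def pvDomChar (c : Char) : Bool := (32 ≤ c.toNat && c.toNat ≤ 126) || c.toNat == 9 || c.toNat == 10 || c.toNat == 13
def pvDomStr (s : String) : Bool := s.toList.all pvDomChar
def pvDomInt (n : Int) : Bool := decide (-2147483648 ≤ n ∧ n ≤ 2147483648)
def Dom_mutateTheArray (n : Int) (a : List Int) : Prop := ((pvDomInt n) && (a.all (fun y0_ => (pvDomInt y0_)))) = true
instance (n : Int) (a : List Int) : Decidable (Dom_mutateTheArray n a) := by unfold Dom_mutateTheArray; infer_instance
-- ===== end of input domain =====

-- B replaces A's per-index neighbour lookups (with first/last boundary branches) by a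
-- two-stage prefix-sum algorithm (objective: alternative; same O(n) cost; no mutation of `a`).

-- ===== PORT A =====
-- literal port of A's loop: for each index i, pick the neighbours with the same two branches
def mutateTheArray (n : Int) (a : List Int) : List Int :=
  (List.range a.length).map (fun (i : Nat) =>
    let cur_elem : Int := (PySem.List.pyGet? a (i : Int)).getD 0
    let first_elem : Int := if i = 0 then 0 else (PySem.List.pyGet? a ((i : Int) - 1)).getD 0
    let last_elem : Int := if (i : Int) = (a.length : Int) - 1 then 0 else (PySem.List.pyGet? a ((i : Int) + 1)).getD 0
    first_elem + cur_elem + last_elem)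

-- ===== PORT B =====
-- the running-sum loop `prefix.append(prefix[-1] + x)` as structural recursion on `a`
def pvBuildPrefix : Int → List Int → List Int
  | s, [] => [s]
  | s, x :: xs => s :: pvBuildPrefix (s + x) xs

def mutateTheArray_alt (n : Int) (a : List Int) : List Int :=
  let pfx := pvBuildPrefix 0 a
  let ln := a.length
  (List.range ln).map (fun (i : Nat) =>
    (PySem.List.pyGet? pfx ((min (i + 2) ln : Nat) : Int)).getD 0 -
    (PySem.List.pyGet? pfx ((i - 1 : Nat) : Int)).getD 0)

-- ===== PRECONDITION & SPEC =====
def Spec_mutateTheArray (n : Int) (a : List Int) (out : List Int) : Prop := out = mutateTheArray_alt n a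
instance (n : Int) (a : List Int) (out : List Int) : Decidable (Spec_mutateTheArray n a out) := by unfold Spec_mutateTheArray; infer_instance

-- ===== CLAIM (what is proved, stated in full; the proofs are below) =====
def Claim_equal_mutateTheArray : Prop := ∀ (n : Int) (a : List Int), Dom_mutateTheArray n a → Spec_mutateTheArray n a (mutateTheArray n a)

-- ===== LEMMAS AND PROOFS =====

lemma pyGetD_nat (a : List Int) (k : Nat) :
    (PySem.List.pyGet? a ((k : Nat) : Int)).getD 0 = a.getD k 0 := by
  rw [PySem.List.pyGet?_natCast, List.getD_eq_getElem?_getD]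

lemma pvBuildPrefix_getD (a : List Int) (s : Int) (k : Nat) (hk : k ≤ a.length) :
    (pvBuildPrefix s a).getD k 0 = s + (a.take k).sum := by
  induction a generalizing s k with
  | nil =>
    have : k = 0 := by simpa using hk
    subst this
    simp [pvBuildPrefix]
  | cons x xs ih =>
    cases k with
    | zero => simp [pvBuildPrefix]
    | succ m =>
      simp only [pvBuildPrefix, List.getD_cons_succ, List.take_succ_cons, List.sum_cons]
      rw [ih (s + x) m (by simpa using hk)]
      ring

lemma take_sum_sub (a : List Int) (j m : Nat) (hjm : j ≤ m) :
    (a.take m).sum - (a.take j).sum = ((a.drop j).take (m - j)).sum := by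
  have h : a.take m = a.take j ++ (a.drop j).take (m - j) := by
    rw [← List.take_add]
    congr 1
    omega
  rw [h, List.sum_append]
  ring

lemma drop_take_one (a : List Int) (j : Nat) (h : j + 1 ≤ a.length) :
    (a.drop j).take 1 = [a.getD j 0] := by
  rw [List.drop_eq_getElem_cons (show j < a.length by omega)]
  simp only [List.take_succ_cons, List.take_zero]
  rw [List.getD_eq_getElem a 0 (show j < a.length by omega)]

lemma drop_take_two (a : List Int) (j : Nat) (h : j + 2 ≤ a.length) :
    (a.drop j).take 2 = [a.getD j 0, a.getD (j + 1) 0] := by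
  rw [List.drop_eq_getElem_cons (show j < a.length by omega),
      List.drop_eq_getElem_cons (show j + 1 < a.length by omega)]
  simp only [List.take_succ_cons, List.take_zero]
  rw [List.getD_eq_getElem a 0 (show j < a.length by omega),
      List.getD_eq_getElem a 0 (show j + 1 < a.length by omega)]

lemma drop_take_three (a : List Int) (j : Nat) (h : j + 3 ≤ a.length) :
    (a.drop j).take 3 = [a.getD j 0, a.getD (j + 1) 0, a.getD (j + 2) 0] := by
  rw [List.drop_eq_getElem_cons (show j < a.length by omega),
      List.drop_eq_getElem_cons (show j + 1 < a.length by omega),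
      List.drop_eq_getElem_cons (show j + 2 < a.length by omega)]
  simp only [List.take_succ_cons, List.take_zero]
  rw [List.getD_eq_getElem a 0 (show j < a.length by omega),
      List.getD_eq_getElem a 0 (show j + 1 < a.length by omega),
      List.getD_eq_getElem a 0 (show j + 2 < a.length by omega)]

lemma window_eq (a : List Int) (i : Nat) (hi : i < a.length) :
    (a.take (min (i + 2) a.length)).sum - (a.take (i - 1)).sum =
      (if i = 0 then 0 else a.getD (i - 1) 0) + a.getD i 0 +
        (if (i : Int) = (a.length : Int) - 1 then 0 else a.getD (i + 1) 0) := by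
  rw [take_sum_sub a (i - 1) (min (i + 2) a.length) (by omega)]
  by_cases h0 : i = 0
  · subst h0
    by_cases hl : ((0 : Nat) : Int) = (a.length : Int) - 1
    · have hn : a.length = 1 := by push_cast at hl; omega
      rw [show min (0 + 2) a.length - (0 - 1) = 1 from by omega, drop_take_one a 0 (by omega)]
      rw [if_pos rfl, if_pos hl]
      simp
    · have hn : 2 ≤ a.length := by push_cast at hl; omega
      rw [show min (0 + 2) a.length - (0 - 1) = 2 from by omega, drop_take_two a 0 (by omega)]
      rw [if_pos rfl, if_neg hl]
      simp
  · obtain ⟨j, rfl⟩ : ∃ j, i = j + 1 := ⟨i - 1, by omega⟩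
    simp only [Nat.add_sub_cancel]
    by_cases hl : ((j + 1 : Nat) : Int) = (a.length : Int) - 1
    · have hn : a.length = j + 2 := by push_cast at hl; omega
      rw [show min (j + 1 + 2) a.length - j = 2 from by omega, drop_take_two a j (by omega)]
      rw [if_neg h0, if_pos hl]
      simp
    · have hn : j + 3 ≤ a.length := by push_cast at hl; omega
      rw [show min (j + 1 + 2) a.length - j = 3 from by omega, drop_take_three a j (by omega)]
      rw [if_neg h0, if_neg hl]
      simp
      ring

-- ===== VERDICT (by name: the statement is the Claim_ definition above) =====
theorem mutateTheArray_spec : Claim_equal_mutateTheArray := by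
  intro n a _
  unfold Spec_mutateTheArray mutateTheArray mutateTheArray_alt
  apply List.map_congr_left
  intro i hi
  rw [List.mem_range] at hi
  rw [pyGetD_nat (pvBuildPrefix 0 a), pyGetD_nat (pvBuildPrefix 0 a),
      pvBuildPrefix_getD a 0 _ (by omega), pvBuildPrefix_getD a 0 _ (by omega)]
  simp only [zero_add]
  rw [window_eq a i hi]
  by_cases h0 : i = 0
  · subst h0
    rw [if_pos rfl, if_pos rfl]
    congr 1
    · rw [pyGetD_nat]
    · by_cases hl : ((0 : Nat) : Int) = (a.length : Int) - 1
      · rw [if_pos hl, if_pos hl]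
      · rw [if_neg hl, if_neg hl,
            show ((0 : Nat) : Int) + 1 = (((0 + 1 : Nat) : Nat) : Int) from by push_cast [Nat.cast_one],
            pyGetD_nat]
  · rw [if_neg h0, if_neg h0]
    congr 1
    · congr 1
      · rw [show ((i : Int) - 1) = (((i - 1 : Nat) : Nat) : Int) from by push_cast [h0]; omega,
            pyGetD_nat]
      · rw [pyGetD_nat]
    · by_cases hl : ((i : Nat) : Int) = (a.length : Int) - 1
      · rw [if_pos hl, if_pos hl]
      · rw [if_neg hl, if_neg hl,
            show ((i : Int) + 1) = (((i + 1 : Nat) : Nat) : Int) from by push_cast; ring,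
            pyGetD_nat]
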